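-- pv_equiv track=rewrite | github.com/Leejaehyub1/Coding_Test | SWEA/무선 충전/무선 충전.py | charge
-- ===== SOURCE A (Python) =====
-- def charge(ay,ax,by,bx, matrix, BC_matrix):
--
--     #사용자 A,B가 받는 BC의 번호 리스트
--     t1 = BC_matrix[ay][ax]
--     t2 = BC_matrix[by][bx]
--
--     ans = 0
--     if t1:
--         if t2:
--             for i in range(len(t1)):
--                 for k in range(len(t2)):
--
--                     #같은 번호라면
--                     if t1[i] == t2[k]:
--                         ans = max(ans, matrix[ay][ax][i])
--
--                     else:
--                         ans = max(ans, matrix[ay][ax][i] + matrix[by][bx][k])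
--
--         else:
--             ans = max(matrix[ay][ax])
--
--     else:
--         if t2:
--             ans = max(matrix[by][bx])
--
--     return ans
-- ===== SOURCE B (Python) =====
-- def charge(ay, ax, by, bx, matrix, BC_matrix):
--     t1 = BC_matrix[ay][ax]
--     t2 = BC_matrix[by][bx]
--     if not t1:
--         return max(matrix[by][bx]) if t2 else 0
--     if not t2:
--         return max(matrix[ay][ax])
--     mA = matrix[ay][ax]
--     mB = matrix[by][bx]
--     # best (value, label) among B's chargers, then the best value under a different label
--     bv = bl = None
--     for v, l in zip(mB, t2):
--         if bv is None or v > bv: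
--             bv, bl = v, l
--     second = None
--     for v, l in zip(mB, t2):
--         if l != bl and (second is None or v > second):
--             second = v
--     t2set = set(t2)
--     ans = 0
--     for a, lab in zip(mA, t1):
--         if lab in t2set and a > ans:
--             ans = a
--         p = bv if lab != bl else second
--         if p is not None and a + p > ans:
--             ans = a + p
--     return ans
-- ===== Notes on version B (the rewrite author's own statement) =====
-- stated objective: faster
-- what changed: Replaces A's nested double loop over both BC lists (all t1*t2 pairs) by linear passes: precompute the B-cell's best charger value with its label, the best value under a different label, and a membership set of B's BC numbers, then one pass over the A-cell combines each entry with its best compatible partner.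
import Mathlib
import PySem

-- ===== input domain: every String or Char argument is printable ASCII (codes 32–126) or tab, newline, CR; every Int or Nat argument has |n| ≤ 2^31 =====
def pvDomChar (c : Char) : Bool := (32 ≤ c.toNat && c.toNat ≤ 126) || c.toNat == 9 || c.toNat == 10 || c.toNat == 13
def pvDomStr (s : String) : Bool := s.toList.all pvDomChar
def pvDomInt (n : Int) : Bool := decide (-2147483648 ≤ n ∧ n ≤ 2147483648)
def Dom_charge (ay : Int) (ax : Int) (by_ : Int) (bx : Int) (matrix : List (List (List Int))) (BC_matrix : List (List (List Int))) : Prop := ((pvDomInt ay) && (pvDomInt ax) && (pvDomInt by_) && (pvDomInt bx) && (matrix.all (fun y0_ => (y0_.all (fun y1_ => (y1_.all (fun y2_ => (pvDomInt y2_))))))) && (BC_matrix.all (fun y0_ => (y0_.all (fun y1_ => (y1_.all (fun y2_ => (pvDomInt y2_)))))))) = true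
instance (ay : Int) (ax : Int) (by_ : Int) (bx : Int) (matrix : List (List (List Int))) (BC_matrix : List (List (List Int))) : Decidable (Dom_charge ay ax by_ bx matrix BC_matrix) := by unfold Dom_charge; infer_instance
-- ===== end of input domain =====

-- B replaces A's nested double loop over both BC lists by a linear pass: precompute B-cell's best
-- charger (value+label), the best value under a different label, and a membership set, then one pass over A-cell.

-- ===== PORT A =====
-- the nested 'for i … for k …' loop of A
def chargeLoopA (mA : List Int) (mB : List Int) (t1 : List Int) (t2 : List Int) : Int :=
  (PySem.List.pyRange 0 (t1.length : Int) 1).foldl (fun ans i =>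
    (PySem.List.pyRange 0 (t2.length : Int) 1).foldl (fun ans k =>
      if PySem.List.pyGetD t1 i 0 = PySem.List.pyGetD t2 k 0 then
        max ans (PySem.List.pyGetD mA i 0)
      else
        max ans (PySem.List.pyGetD mA i 0 + PySem.List.pyGetD mB k 0)) ans) 0

def charge (ay : Int) (ax : Int) (by_ : Int) (bx : Int) (matrix : List (List (List Int))) (BC_matrix : List (List (List Int))) : Int :=
  let t1 := PySem.List.pyGetD (PySem.List.pyGetD BC_matrix ay []) ax []
  let t2 := PySem.List.pyGetD (PySem.List.pyGetD BC_matrix by_ []) bx []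
  if t1 ≠ [] then
    if t2 ≠ [] then
      chargeLoopA (PySem.List.pyGetD (PySem.List.pyGetD matrix ay []) ax [])
        (PySem.List.pyGetD (PySem.List.pyGetD matrix by_ []) bx []) t1 t2
    else
      (PySem.List.max? (PySem.List.pyGetD (PySem.List.pyGetD matrix ay []) ax []) (fun x => x)).getD 0
  else
    if t2 ≠ [] then
      (PySem.List.max? (PySem.List.pyGetD (PySem.List.pyGetD matrix by_ []) bx []) (fun x => x)).getD 0
    else 0

-- ===== PORT B =====
-- 'for v, l in zip(mB, t2): if bv is None or v > bv: bv, bl = v, l'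
def bestStep (b : Option (Int × Int)) (p : Int × Int) : Option (Int × Int) :=
  match b with
  | none => some p
  | some q => if p.1 > q.1 then some p else some q

def bestB (z : List (Int × Int)) : Option (Int × Int) :=
  z.foldl bestStep none

-- 'for v, l in zip(mB, t2): if l != bl and (second is None or v > second): second = v'
def secStep (bl : Int) (s : Option Int) (p : Int × Int) : Option Int :=
  if p.2 ≠ bl then
    match s with
    | none => some p.1
    | some sv => if p.1 > sv then some p.1 else s
  else s

def secondB (z : List (Int × Int)) (bl : Int) : Option Int :=
  z.foldl (secStep bl) none

-- the body of B's single pass over zip(mA, t1)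
def bodyB (t2 : List Int) (bb : Option (Int × Int)) (second : Option Int) (ans : Int) (p : Int × Int) : Int :=
  let ans1 := if p.2 ∈ PySem.Set.ofList t2 ∧ p.1 > ans then p.1 else ans
  let po : Option Int :=
    match bb with
    | none => none
    | some q => if p.2 ≠ q.2 then some q.1 else second
  match po with
  | none => ans1
  | some pv => if p.1 + pv > ans1 then p.1 + pv else ans1

def charge_alt (ay : Int) (ax : Int) (by_ : Int) (bx : Int) (matrix : List (List (List Int))) (BC_matrix : List (List (List Int))) : Int :=
  let t1 := PySem.List.pyGetD (PySem.List.pyGetD BC_matrix ay []) ax []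
  let t2 := PySem.List.pyGetD (PySem.List.pyGetD BC_matrix by_ []) bx []
  if t1 = [] then
    if t2 ≠ [] then
      (PySem.List.max? (PySem.List.pyGetD (PySem.List.pyGetD matrix by_ []) bx []) (fun x => x)).getD 0
    else 0
  else if t2 = [] then
    (PySem.List.max? (PySem.List.pyGetD (PySem.List.pyGetD matrix ay []) ax []) (fun x => x)).getD 0
  else
    let mA := PySem.List.pyGetD (PySem.List.pyGetD matrix ay []) ax []
    let mB := PySem.List.pyGetD (PySem.List.pyGetD matrix by_ []) bx []
    let z := mB.zip t2
    let bb := bestB z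
    let second : Option Int :=
      match bb with
      | none => none
      | some q => secondB z q.2
    (mA.zip t1).foldl (bodyB t2 bb second) 0

-- ===== PRECONDITION & SPEC =====
-- Pre_ excludes exactly the inputs on which Python A raises: an out-of-range cell index
-- (IndexError), a matrix charge list shorter than its BC list (IndexError inside the loop),
-- or max() of an empty charge list (ValueError).
def Pre_charge (ay : Int) (ax : Int) (by_ : Int) (bx : Int) (matrix : List (List (List Int))) (BC_matrix : List (List (List Int))) : Prop :=
  PySem.Raise.InRange BC_matrix.length ay ∧
  PySem.Raise.InRange (PySem.List.pyGetD BC_matrix ay []).length ax ∧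
  PySem.Raise.InRange BC_matrix.length by_ ∧
  PySem.Raise.InRange (PySem.List.pyGetD BC_matrix by_ []).length bx ∧
  (let t1 := PySem.List.pyGetD (PySem.List.pyGetD BC_matrix ay []) ax []
   let t2 := PySem.List.pyGetD (PySem.List.pyGetD BC_matrix by_ []) bx []
   let mA := PySem.List.pyGetD (PySem.List.pyGetD matrix ay []) ax []
   let mB := PySem.List.pyGetD (PySem.List.pyGetD matrix by_ []) bx []
   (t1 ≠ [] →
      PySem.Raise.InRange matrix.length ay ∧
      PySem.Raise.InRange (PySem.List.pyGetD matrix ay []).length ax ∧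
      (t2 = [] → mA ≠ []) ∧
      (t2 ≠ [] → t1.length ≤ mA.length ∧
        PySem.Raise.InRange matrix.length by_ ∧
        PySem.Raise.InRange (PySem.List.pyGetD matrix by_ []).length bx ∧
        t2.length ≤ mB.length)) ∧
   (t1 = [] → t2 ≠ [] →
      PySem.Raise.InRange matrix.length by_ ∧
      PySem.Raise.InRange (PySem.List.pyGetD matrix by_ []).length bx ∧
      mB ≠ []))

instance (ay : Int) (ax : Int) (by_ : Int) (bx : Int) (matrix : List (List (List Int))) (BC_matrix : List (List (List Int))) : Decidable (Pre_charge ay ax by_ bx matrix BC_matrix) := by unfold Pre_charge; infer_instance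

def pvWitness_charge : Int × Int × Int × Int × List (List (List Int)) × List (List (List Int)) :=
  (0, 0, 0, 0, [[[5]]], [[[1]]])

def Spec_charge (ay : Int) (ax : Int) (by_ : Int) (bx : Int) (matrix : List (List (List Int))) (BC_matrix : List (List (List Int))) (out : Int) : Prop := out = charge_alt ay ax by_ bx matrix BC_matrix
instance (ay : Int) (ax : Int) (by_ : Int) (bx : Int) (matrix : List (List (List Int))) (BC_matrix : List (List (List Int))) (out : Int) : Decidable (Spec_charge ay ax by_ bx matrix BC_matrix out) := by unfold Spec_charge; infer_instance

-- ===== CLAIM (what is proved, stated in full; the proofs are below) =====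
def Claim_equal_charge : Prop := ∀ (ay : Int) (ax : Int) (by_ : Int) (bx : Int) (matrix : List (List (List Int))) (BC_matrix : List (List (List Int))), Dom_charge ay ax by_ bx matrix BC_matrix → Pre_charge ay ax by_ bx matrix BC_matrix → Spec_charge ay ax by_ bx matrix BC_matrix (charge ay ax by_ bx matrix BC_matrix)

-- ===== LEMMAS AND PROOFS =====

-- A's inner loop, over the zipped B-cell list
def innerZ (zB : List (Int × Int)) (p : Int × Int) (ans : Int) : Int :=
  zB.foldl (fun ans q => if p.2 = q.2 then max ans p.1 else max ans (p.1 + q.1)) ans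

theorem bestStep_spec (acc : Option (Int × Int)) (p : Int × Int) :
    ∃ r, bestStep acc p = some r ∧ p.1 ≤ r.1 ∧ (∀ v, acc = some v → v.1 ≤ r.1) ∧ (r = p ∨ acc = some r) := by
  unfold bestStep
  rcases acc with _ | q
  · exact ⟨p, rfl, le_refl _, by simp, Or.inl rfl⟩
  · by_cases hc : p.1 > q.1
    · refine ⟨p, by simp [hc], le_refl _, ?_, Or.inl rfl⟩
      intro v hv; injection hv with hv; subst hv; omega
    · refine ⟨q, by simp [hc], le_of_not_gt hc, ?_, Or.inr rfl⟩
      intro v hv; injection hv with hv; subst hv; exact le_refl _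

theorem bestFold_some (z : List (Int × Int)) (acc : Option (Int × Int)) (bv bl : Int)
    (h : z.foldl bestStep acc = some (bv, bl)) :
    (acc = some (bv, bl) ∨ (bv, bl) ∈ z) ∧ (∀ q ∈ z, q.1 ≤ bv) ∧ (∀ q, acc = some q → q.1 ≤ bv) := by
  induction z generalizing acc with
  | nil => simp_all
  | cons p z ih =>
    simp only [List.foldl_cons] at h
    obtain ⟨h1, h2, h3⟩ := ih (bestStep acc p) h
    obtain ⟨r, hr, hpr, haccr, hrp⟩ := bestStep_spec acc p
    have hrbv : r.1 ≤ bv := h3 r hr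
    refine ⟨?_, ?_, ?_⟩
    · rcases h1 with h1 | h1
      · rw [hr] at h1
        injection h1 with h1; subst h1
        rcases hrp with h | h
        · right; rw [h]; exact List.mem_cons_self
        · left; exact h
      · right; exact List.mem_cons_of_mem _ h1
    · intro q hq
      rcases List.mem_cons.mp hq with hq | hq
      · subst hq; exact le_trans hpr hrbv
      · exact h2 q hq
    · intro q hq; exact le_trans (haccr q hq) hrbv

theorem secStep_spec (bl : Int) (acc : Option Int) (p : Int × Int) :
    (secStep bl acc p = none → acc = none ∧ p.2 = bl) ∧
    (∀ sv, secStep bl acc p = some sv → (acc = some sv ∨ (p.2 ≠ bl ∧ p.1 = sv))) ∧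
    (p.2 ≠ bl → ∃ w, secStep bl acc p = some w ∧ p.1 ≤ w) ∧
    (∀ v, acc = some v → ∃ w, secStep bl acc p = some w ∧ v ≤ w) := by
  unfold secStep
  by_cases hp : p.2 = bl <;> rcases acc with _ | v <;> simp [hp]
  · by_cases hc : p.1 > v <;> simp [hc] <;> omega

theorem secFold_none (z : List (Int × Int)) (bl : Int) (acc : Option Int)
    (h : z.foldl (secStep bl) acc = none) :
    acc = none ∧ ∀ q ∈ z, q.2 = bl := by
  induction z generalizing acc with
  | nil => simp_all
  | cons p z ih =>
    simp only [List.foldl_cons] at h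
    obtain ⟨hacc', hall⟩ := ih (secStep bl acc p) h
    obtain ⟨s1, _, _, _⟩ := secStep_spec bl acc p
    obtain ⟨ha, hp⟩ := s1 hacc'
    refine ⟨ha, ?_⟩
    intro q hq
    rcases List.mem_cons.mp hq with hq | hq
    · subst hq; exact hp
    · exact hall q hq

theorem secFold_some (z : List (Int × Int)) (bl : Int) (acc : Option Int) (sv : Int)
    (h : z.foldl (secStep bl) acc = some sv) :
    (acc = some sv ∨ ∃ q ∈ z, q.2 ≠ bl ∧ q.1 = sv) ∧ (∀ q ∈ z, q.2 ≠ bl → q.1 ≤ sv) ∧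
      (∀ v, acc = some v → v ≤ sv) := by
  induction z generalizing acc with
  | nil => simp_all
  | cons p z ih =>
    simp only [List.foldl_cons] at h
    obtain ⟨h1, h2, h3⟩ := ih (secStep bl acc p) h
    obtain ⟨s1, s2, s3, s4⟩ := secStep_spec bl acc p
    refine ⟨?_, ?_, ?_⟩
    · rcases h1 with h1 | ⟨q, hq, hqs⟩
      · rcases s2 sv h1 with h | h
        · exact Or.inl h
        · exact Or.inr ⟨p, List.mem_cons_self, h⟩
      · exact Or.inr ⟨q, List.mem_cons_of_mem _ hq, hqs⟩
    · intro q hq hqbl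
      rcases List.mem_cons.mp hq with hq | hq
      · subst hq
        obtain ⟨w, hw, hpw⟩ := s3 hqbl
        exact le_trans hpw (h3 w hw)
      · exact h2 q hq hqbl
    · intro v hv
      obtain ⟨w, hw, hvw⟩ := s4 v hv
      exact le_trans hvw (h3 w hw)

theorem idx_fold_eq_zip_fold (mA t1 : List Int) (h : t1.length ≤ mA.length)
    (g : Int → Int → Int → Int) (init : Int) :
    (PySem.List.pyRange 0 (t1.length : Int) 1).foldl
      (fun ans i => g ans (PySem.List.pyGetD mA i 0) (PySem.List.pyGetD t1 i 0)) init
    = (mA.zip t1).foldl (fun ans p => g ans p.1 p.2) init := by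
  have hz : (mA.zip t1).length = t1.length := by
    rw [List.length_zip]; omega
  have hcongr : (PySem.List.pyRange 0 (t1.length : Int) 1).foldl
      (fun ans i => g ans (PySem.List.pyGetD mA i 0) (PySem.List.pyGetD t1 i 0)) init
      = (PySem.List.pyRange 0 (t1.length : Int) 1).foldl
      (fun ans i => (fun acc (q : Int × Int) => g acc q.1 q.2) ans (PySem.List.pyGetD (mA.zip t1) i ((0 : Int), (0 : Int)))) init := by
    apply PySem.List.foldl_congr_mem
    intro acc i hi
    obtain ⟨h0, hlt⟩ := (PySem.List.mem_pyRange_one).mp hi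
    rw [PySem.List.pyGetD_eq_getElem mA (0 : Int) h0 (by omega),
        PySem.List.pyGetD_eq_getElem t1 (0 : Int) h0 (by omega),
        PySem.List.pyGetD_eq_getElem (mA.zip t1) ((0 : Int), (0 : Int)) h0 (by rw [hz]; omega)]
    simp [List.getElem_zip]
  rw [hcongr, show ((t1.length : Int)) = (((mA.zip t1).length : Int)) by rw [hz]]
  exact PySem.List.foldl_pyRange_zero_pyGetD' (mA.zip t1) ((0 : Int), (0 : Int)) (fun acc q => g acc q.1 q.2) init

theorem bodyB_eq_innerZ (t2 mB : List Int) (h2 : t2.length ≤ mB.length)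
    (bv bl : Int) (hb : bestB (mB.zip t2) = some (bv, bl))
    (ans : Int) (p : Int × Int) :
    bodyB t2 (some (bv, bl)) (secondB (mB.zip t2) bl) ans p = innerZ (mB.zip t2) p ans := by
  set z := mB.zip t2 with hzdef
  have hsnd : z.map Prod.snd = t2 := List.map_snd_zip h2
  obtain ⟨hmemb, hmax, -⟩ := bestFold_some z none bv bl hb
  have hmem : (bv, bl) ∈ z := by
    rcases hmemb with h | h
    · simp at h
    · exact h
  set f : Int × Int → Int := fun q => if p.2 = q.2 then p.1 else p.1 + q.1 with hf
  have hval : innerZ z p ans = (z.map f).foldl max ans := by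
    rw [List.foldl_map]
    unfold innerZ
    apply PySem.List.foldl_congr_mem
    intro acc q _
    simp only [hf]
    by_cases h : p.2 = q.2 <;> simp [h]
  obtain ⟨hA0, hA1⟩ := PySem.List.le_foldl_max (z.map f) ans
  have hA3 := PySem.List.foldl_max_mem (z.map f) ans
  rw [← hval] at hA0 hA1 hA3
  have hfle : ∀ q ∈ z, f q ≤ innerZ z p ans := by
    intro q hq; exact hA1 (f q) (List.mem_map_of_mem hq)
  have hmemt2 : p.2 ∈ PySem.Set.ofList t2 ↔ ∃ q ∈ z, q.2 = p.2 := by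
    rw [PySem.Set.mem_ofList, ← hsnd]
    simp [List.mem_map, eq_comm]
  -- unfold bodyB
  show (let ans1 := if p.2 ∈ PySem.Set.ofList t2 ∧ p.1 > ans then p.1 else ans
        let po : Option Int := if p.2 ≠ bl then some bv else secondB z bl
        match po with
        | none => ans1
        | some pv => if p.1 + pv > ans1 then p.1 + pv else ans1) = innerZ z p ans
  set ans1 := if p.2 ∈ PySem.Set.ofList t2 ∧ p.1 > ans then p.1 else ans with hans1
  have hans_le_ans1 : ans ≤ ans1 := by
    rw [hans1]; split_ifs with h
    · omega
    · exact le_refl _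
  have hans1_le : ans1 ≤ innerZ z p ans := by
    rw [hans1]; split_ifs with h
    · obtain ⟨q, hq, hq2⟩ := hmemt2.mp h.1
      have := hfle q hq
      rw [hf] at this; simp only [hq2, if_pos] at this
      exact this
    · exact hA0
  have hp1_le_ans1 : (∃ q ∈ z, q.2 = p.2) → p.1 ≤ ans1 := by
    intro hx
    rw [hans1]
    split_ifs with h
    · exact le_refl _
    · rw [not_and_or] at h
      rcases h with h | h
      · exact absurd (hmemt2.mpr hx) h
      · omega
  by_cases hpb : p.2 = bl
  · -- po = secondB z bl
    simp only [hpb, ne_eq, not_true_eq_false, if_false]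
    rcases hsec : secondB z bl with _ | sv
    · -- all labels equal bl
      obtain ⟨-, hall⟩ := secFold_none z bl none hsec
      simp only []
      apply le_antisymm hans1_le
      rcases hA3 with h | h
      · rw [h]; exact hans_le_ans1
      · obtain ⟨q, hq, hfq⟩ := List.mem_map.mp h
        rw [← hfq, hf]
        have hq2 : q.2 = p.2 := by rw [hall q hq, hpb]
        simp only [hq2, if_pos]
        exact hp1_le_ans1 ⟨q, hq, hq2⟩
    · obtain ⟨hw, hub, -⟩ := secFold_some z bl none sv hsec
      have hwit : ∃ q ∈ z, q.2 ≠ bl ∧ q.1 = sv := by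
        rcases hw with h | h
        · simp at h
        · exact h
      obtain ⟨qs, hqs, hqs2, hqs1⟩ := hwit
      simp only []
      apply le_antisymm
      · split_ifs with h
        · -- p.1 + sv ≤ innerZ
          have := hfle qs hqs
          rw [hf] at this
          have hne : p.2 ≠ qs.2 := by rw [hpb]; exact fun hh => hqs2 hh.symm
          simp only [if_neg hne] at this
          omega
        · exact hans1_le
      · rcases hA3 with h | h
        · rw [h]; split_ifs <;> omega
        · obtain ⟨q, hq, hfq⟩ := List.mem_map.mp h
          rw [← hfq, hf]
          by_cases hq2 : p.2 = q.2
          · simp only [if_pos hq2]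
            have := hp1_le_ans1 ⟨q, hq, hq2.symm⟩
            split_ifs <;> omega
          · simp only [if_neg hq2]
            have hqbl : q.2 ≠ bl := by rw [← hpb]; exact fun hh => hq2 hh.symm
            have := hub q hq hqbl
            split_ifs <;> omega
  · -- po = some bv
    simp only [hpb, ne_eq, not_false_eq_true, if_true]
    have hbvle : p.1 + bv ≤ innerZ z p ans := by
      have := hfle (bv, bl) hmem
      rw [hf] at this
      simp only [if_neg hpb] at this
      exact this
    apply le_antisymm
    · split_ifs with h
      · exact hbvle
      · exact hans1_le
    · rcases hA3 with h | h
      · rw [h]; split_ifs <;> omega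
      · obtain ⟨q, hq, hfq⟩ := List.mem_map.mp h
        rw [← hfq, hf]
        by_cases hq2 : p.2 = q.2
        · simp only [if_pos hq2]
          have := hp1_le_ans1 ⟨q, hq, hq2.symm⟩
          split_ifs <;> omega
        · simp only [if_neg hq2]
          have := hmax q hq
          split_ifs <;> omega

theorem bestFold_isSome (z : List (Int × Int)) (q : Int × Int) :
    ∃ r, z.foldl bestStep (some q) = some r := by
  induction z generalizing q with
  | nil => exact ⟨q, rfl⟩
  | cons p z ih =>
    simp only [List.foldl_cons]
    obtain ⟨r, hr, -⟩ := bestStep_spec (some q) p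
    rw [hr]; exact ih r

theorem bestB_isSome (z : List (Int × Int)) (hz : z ≠ []) : ∃ r, bestB z = some r := by
  rcases z with _ | ⟨p, z⟩
  · exact absurd rfl hz
  · unfold bestB
    simp only [List.foldl_cons]
    exact bestFold_isSome z p

theorem loops_eq (mA mB t1 t2 : List Int) (h1 : t1.length ≤ mA.length)
    (h2 : t2.length ≤ mB.length) (hn2 : t2 ≠ []) :
    chargeLoopA mA mB t1 t2
      = (mA.zip t1).foldl
          (bodyB t2 (bestB (mB.zip t2))
            (match bestB (mB.zip t2) with | none => none | some q => secondB (mB.zip t2) q.2)) 0 := by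
  have hzne : mB.zip t2 ≠ [] := by
    have hlen : (mB.zip t2).length = t2.length := by rw [List.length_zip]; omega
    intro h
    rw [h] at hlen
    simp at hlen
    exact hn2 (List.length_eq_zero_iff.mp hlen.symm)
  obtain ⟨⟨bv, bl⟩, hbb⟩ := bestB_isSome _ hzne
  unfold chargeLoopA
  rw [idx_fold_eq_zip_fold mA t1 h1
      (fun ans a la => (PySem.List.pyRange 0 (t2.length : Int) 1).foldl (fun ans k =>
        if la = PySem.List.pyGetD t2 k 0 then max ans a
        else max ans (a + PySem.List.pyGetD mB k 0)) ans) 0]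
  rw [hbb]
  apply PySem.List.foldl_congr_mem
  intro acc p _
  have hinner : (PySem.List.pyRange 0 (t2.length : Int) 1).foldl (fun ans k =>
      if p.2 = PySem.List.pyGetD t2 k 0 then max ans p.1
      else max ans (p.1 + PySem.List.pyGetD mB k 0)) acc = innerZ (mB.zip t2) p acc := by
    rw [idx_fold_eq_zip_fold mB t2 h2
        (fun ans b lb => if p.2 = lb then max ans p.1 else max ans (p.1 + b)) acc]
    rfl
  rw [hinner]
  exact (bodyB_eq_innerZ t2 mB h2 bv bl hbb acc p).symm

-- ===== VERDICT (by name: the statement is the Claim_ definition above) =====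
theorem charge_spec : Claim_equal_charge := by
  intro ay ax by_ bx matrix BC_matrix _ hpre
  unfold Spec_charge
  obtain ⟨-, -, -, -, hA, hB⟩ := hpre
  simp only [charge, charge_alt]
  set t1 := PySem.List.pyGetD (PySem.List.pyGetD BC_matrix ay []) ax [] with ht1
  set t2 := PySem.List.pyGetD (PySem.List.pyGetD BC_matrix by_ []) bx [] with ht2
  set mA := PySem.List.pyGetD (PySem.List.pyGetD matrix ay []) ax [] with hmA
  set mB := PySem.List.pyGetD (PySem.List.pyGetD matrix by_ []) bx [] with hmB
  by_cases h1 : t1 = []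
  · by_cases h2 : t2 = [] <;> simp [h1, h2]
  · by_cases h2 : t2 = []
    · simp [h1, h2]
    · simp only [h1, h2, if_neg, ne_eq, not_false_eq_true, if_true]
      obtain ⟨-, -, -, hlen⟩ := hA h1
      obtain ⟨hlen1, -, -, hlen2⟩ := hlen h2
      exact loops_eq mA mB t1 t2 hlen1 hlen2 h2
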